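-- pv_equiv track=rewrite | github.com/wensersay/autocatastro-ai | app.py | join_sides_spanish
-- ===== SOURCE A (Python) =====
-- from typing import Dict, List, Optional, Tuple
--
-- def join_sides_spanish(sides: List[str]) -> str:
--     pretty = {
--         "norte": "Norte", "noreste": "Noreste", "este": "Este", "sureste": "Sureste",
--         "sur": "Sur", "suroeste": "Suroeste", "oeste": "Oeste", "noroeste": "Noroeste",
--     }
--     labels = [pretty[s] for s in sides]
--     if len(labels) == 1:
--         return labels[0]
--     if len(labels) == 2:
--         return f"{labels[0]} y {labels[1]}"
--     return ", ".join(labels[:-1]) + f" y {labels[-1]}"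
-- ===== SOURCE B (Python) =====
-- def join_sides_spanish(sides):
--     pretty = {
--         "norte": "Norte", "noreste": "Noreste", "este": "Este", "sureste": "Sureste",
--         "sur": "Sur", "suroeste": "Suroeste", "oeste": "Oeste", "noroeste": "Noroeste",
--     }
--     labels = [pretty[s] for s in sides]
--
--     def go(ls):
--         if len(ls) == 1:
--             return ls[0]
--         if len(ls) == 2:
--             return ls[0] + " y " + ls[1]
--         return ls[0] + ", " + go(ls[1:])
--
--     return go(labels)
-- ===== Notes on version B (the rewrite author's own statement) =====
-- stated objective: alternative
-- what changed: Replaces A's slice-then-join-then-append formatting (labels[:-1] joined with ', ' plus a separately glued ' y ' last label) by a single front-to-back structural recursion that picks the separator (', ' or ' y ') by how many labels remain.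
import Mathlib
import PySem

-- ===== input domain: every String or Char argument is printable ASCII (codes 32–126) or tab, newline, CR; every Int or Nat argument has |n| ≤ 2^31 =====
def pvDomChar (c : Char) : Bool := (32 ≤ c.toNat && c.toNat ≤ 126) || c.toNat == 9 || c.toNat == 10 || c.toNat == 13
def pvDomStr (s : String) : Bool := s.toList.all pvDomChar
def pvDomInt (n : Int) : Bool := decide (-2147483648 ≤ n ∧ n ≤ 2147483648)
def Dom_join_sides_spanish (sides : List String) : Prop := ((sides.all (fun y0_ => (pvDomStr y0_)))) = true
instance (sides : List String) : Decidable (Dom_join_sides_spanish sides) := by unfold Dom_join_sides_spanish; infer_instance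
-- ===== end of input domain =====

-- B differs from A only in structure (a single recursion instead of slice+join+append); return values agree on Pre_.

-- ===== PORT A =====
def prettyDict : PySem.Dict String String :=
  PySem.Dict.ofList [("norte", "Norte"), ("noreste", "Noreste"), ("este", "Este"),
    ("sureste", "Sureste"), ("sur", "Sur"), ("suroeste", "Suroeste"),
    ("oeste", "Oeste"), ("noroeste", "Noroeste")]

def join_sides_spanish (sides : List String) : String :=
  let labels := sides.map (fun s => (prettyDict.get? s).getD "")
  if labels.length == 1 then
    PySem.List.pyGetD labels 0 ""
  else if labels.length == 2 then
    (PySem.List.pyGetD labels 0 "") ++ " y " ++ (PySem.List.pyGetD labels 1 "")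
  else
    PySem.Str.join ", " (PySem.List.slice labels none (some (-1)))
      ++ " y " ++ (PySem.List.pyGetD labels (-1) "")

-- ===== PORT B =====
def goJoin : List String → String
  | [] => ""                                  -- Python's go raises IndexError here (outside Pre_)
  | [a] => a
  | [a, b] => a ++ " y " ++ b
  | a :: rest => a ++ ", " ++ goJoin rest

def join_sides_spanish_alt (sides : List String) : String :=
  let labels := sides.map (fun s => (prettyDict.get? s).getD "")
  goJoin labels

-- ===== PRECONDITION & SPEC =====
-- Pre_ excludes exactly the inputs on which the Python A raises: the empty list (IndexError)
-- and lists containing a string that is not one of the eight compass keys (KeyError).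
def Pre_join_sides_spanish (sides : List String) : Prop :=
  sides ≠ [] ∧ ∀ s ∈ sides, (prettyDict.get? s).isSome = true
instance (sides : List String) : Decidable (Pre_join_sides_spanish sides) := by
  unfold Pre_join_sides_spanish; infer_instance

def pvWitness_join_sides_spanish : List String := ["norte", "sur", "este"]

def Spec_join_sides_spanish (sides : List String) (out : String) : Prop := out = join_sides_spanish_alt sides
instance (sides : List String) (out : String) : Decidable (Spec_join_sides_spanish sides out) := by unfold Spec_join_sides_spanish; infer_instance

-- ===== CLAIM (what is proved, stated in full; the proofs are below) =====
def Claim_equal_join_sides_spanish : Prop := ∀ (sides : List String), Dom_join_sides_spanish sides → Pre_join_sides_spanish sides → Spec_join_sides_spanish sides (join_sides_spanish sides)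

-- ===== LEMMAS AND PROOFS =====

-- A's formatting formula coincides with B's recursion on every nonempty label list.
-- ", ".join of two-or-more strings peels off its head (String-level form of PySem.Chars.join_cons_cons).
theorem join_cons_cons_str (p q : String) (r : List String) :
    PySem.Str.join ", " (p :: q :: r) = p ++ ", " ++ PySem.Str.join ", " (q :: r) := by
  rw [← String.toList_inj]
  simp [PySem.Str.join, PySem.Chars.join_cons_cons]

theorem join_singleton_str (p : String) : PySem.Str.join ", " [p] = p := by
  rw [← String.toList_inj]
  simp [PySem.Str.join, PySem.Chars.join_singleton]

-- A's three-or-more formula equals B's recursion, by induction on the tail.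
theorem main_eq (t : List String) : ∀ (a b : String),
    PySem.Str.join ", " ((a :: b :: t).dropLast) ++ " y "
      ++ (a :: b :: t).getLast (by simp) = goJoin (a :: b :: t) := by
  induction t with
  | nil =>
    intro a b
    simp [goJoin, join_singleton_str]
  | cons c t' ih =>
    intro a b
    have hdl : (a :: b :: c :: t').dropLast = a :: (b :: c :: t').dropLast := rfl
    have hgl : (a :: b :: c :: t').getLast (by simp) = (b :: c :: t').getLast (by simp) := by
      simp [List.getLast]
    rw [hdl, hgl]
    have hdl2 : (b :: c :: t').dropLast = b :: (c :: t').dropLast := rfl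
    rw [hdl2, join_cons_cons_str, ← hdl2]
    have : goJoin (a :: b :: c :: t') = a ++ ", " ++ goJoin (b :: c :: t') := rfl
    rw [this, ← ih b c]
    simp [String.append_assoc]

theorem goJoin_eq (ls : List String) (h : ls ≠ []) :
    (if ls.length == 1 then PySem.List.pyGetD ls 0 ""
     else if ls.length == 2 then
       (PySem.List.pyGetD ls 0 "") ++ " y " ++ (PySem.List.pyGetD ls 1 "")
     else
       PySem.Str.join ", " (PySem.List.slice ls none (some (-1)))
         ++ " y " ++ (PySem.List.pyGetD ls (-1) "")) = goJoin ls := by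
  match ls with
  | [a] => simp [goJoin, PySem.List.pyGetD_zero_cons]
  | [a, b] => simp [goJoin, pysem]
  | a :: b :: c :: t =>
    have h2 : ((a :: b :: c :: t).length == 1) = false := by simp
    have h3 : ((a :: b :: c :: t).length == 2) = false := by simp
    rw [h2, h3]
    simp only [Bool.false_eq_true, if_false]
    rw [PySem.List.slice_to_neg_one, PySem.List.pyGetD_neg_one _ _ (by simp)]
    exact main_eq (c :: t) a b

theorem join_sides_spanish_spec : Claim_equal_join_sides_spanish := by
  intro sides _ hpre
  unfold Spec_join_sides_spanish join_sides_spanish join_sides_spanish_alt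
  simp only
  exact goJoin_eq _ (by simpa using hpre.1)
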